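-- pv_equiv track=rewrite | github.com/Herol27/python_training | different_registers_finder.py | find_in_different_registers
-- ===== SOURCE A (Python) =====
-- def find_in_different_registers(words: list[str]):
--     temp = dict()
--     for word in words:
--         if word not in temp:
--             temp[word] = 1
--         else:
--             temp[word] += 1
--     res = set()
--     duplicates = set()
--     for i in temp:
--         if temp[i] > 1:
--             duplicates.add(i.lower())
--     for i in temp:
--         if i.lower() not in duplicates:
--             res.add(i.lower())
--     return list(res)
-- ===== SOURCE B (Python) =====
-- def find_in_different_registers(words: list[str]):
--     ws = sorted(words)
--     dup_lowers = {a.lower() for a, b in zip(ws, ws[1:]) if a == b}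
--     return list({w.lower() for w in words} - dup_lowers)
-- ===== Notes on version B (the rewrite author's own statement) =====
-- stated objective: alternative
-- what changed: Duplicates are detected by sorting the words and scanning adjacent equal pairs (sort-then-scan) instead of building a count dict and filtering keys with count > 1; the result is one set difference.
import Mathlib
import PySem

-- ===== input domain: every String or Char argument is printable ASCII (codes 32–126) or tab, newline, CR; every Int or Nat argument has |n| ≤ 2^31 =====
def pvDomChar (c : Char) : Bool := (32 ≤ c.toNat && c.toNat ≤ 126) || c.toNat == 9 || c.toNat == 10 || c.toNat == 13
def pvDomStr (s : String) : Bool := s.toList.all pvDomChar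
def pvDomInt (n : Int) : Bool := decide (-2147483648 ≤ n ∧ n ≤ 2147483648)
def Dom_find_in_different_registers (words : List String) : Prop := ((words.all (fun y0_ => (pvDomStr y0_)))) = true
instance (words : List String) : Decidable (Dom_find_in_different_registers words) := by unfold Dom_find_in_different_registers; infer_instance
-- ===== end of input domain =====

-- B detects exact-case duplicates by sorting the words and scanning adjacent equal pairs, instead of A's count dict plus two key-filtering passes (objective: alternative).
-- Note: the Python functions return list(<set>); outputs are compared as sets (Python's set iteration order is not modelled).

-- ===== PORT A =====
-- temp[i] in the loops over temp's keys always hits an existing key, so it is ported as getD with default 0 (exact here).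
def find_in_different_registers (words : List String) : List String :=
  let temp : PySem.Dict String Int := words.foldl
    (fun d w => if d.contains w then d.modify w 1 (· + 1) else d.insert w 1) PySem.Dict.empty
  let duplicates : PySem.Set String := temp.keys.foldl
    (fun s k => if temp.getD k 0 > 1 then PySem.Set.add s (PySem.Str.lower k) else s) PySem.Set.empty
  temp.keys.foldl
    (fun s k => if PySem.Set.contains duplicates (PySem.Str.lower k) = false then PySem.Set.add s (PySem.Str.lower k) else s)
    PySem.Set.empty

-- ===== PORT B =====
def find_in_different_registers_alt (words : List String) : List String :=
  let ws := PySem.List.sorted words (fun x => x) false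
  let dup_lowers : PySem.Set String := (ws.zip (PySem.List.slice ws (some 1) none)).foldl
    (fun s p => if p.1 == p.2 then PySem.Set.add s (PySem.Str.lower p.1) else s) PySem.Set.empty
  PySem.Set.diff (PySem.Set.ofList (words.map PySem.Str.lower)) dup_lowers

-- ===== PRECONDITION & SPEC =====
def Spec_find_in_different_registers (words : List String) (out : List String) : Prop := out = find_in_different_registers_alt words
instance (words : List String) (out : List String) : Decidable (Spec_find_in_different_registers words out) := by unfold Spec_find_in_different_registers; infer_instance

-- ===== CLAIM (what is proved, stated in full; the proofs are below) =====
def Claim_equal_find_in_different_registers : Prop := ∀ (words : List String), Dom_find_in_different_registers words → Spec_find_in_different_registers words (find_in_different_registers words)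

-- ===== LEMMAS AND PROOFS =====

theorem pvStepA_eq (d : PySem.Dict String Int) (w : String) :
    (if d.contains w then d.modify w 1 (· + 1) else d.insert w 1) = d.modify w 0 (· + 1) := by
  by_cases h : d.contains w = true
  · obtain ⟨v, hv⟩ : ∃ v, d.get? w = some v := by
      have := PySem.Dict.contains_eq_isSome_get? (d := d) (k := w)
      rw [h] at this; exact Option.isSome_iff_exists.mp this.symm
    simp [h, PySem.Dict.modify, PySem.Dict.getD_eq_get?_getD, hv]
  · have hn : d.get? w = none := by
      have := PySem.Dict.contains_eq_isSome_get? (d := d) (k := w)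
      simp only [Bool.not_eq_true] at h; rw [h] at this
      exact Option.not_isSome_iff_eq_none.mp (by simp [← this])
    simp [h, PySem.Dict.modify, PySem.Dict.getD_eq_get?_getD, hn]

theorem pvTempA_eq (words : List String) :
    words.foldl (fun d w => if d.contains w then d.modify w 1 (· + 1) else d.insert w 1) PySem.Dict.empty
      = PySem.Dict.counter words := by
  have h : (fun (d : PySem.Dict String Int) w => if d.contains w then d.modify w 1 (· + 1) else d.insert w 1)
      = fun d w => d.modify w 0 (· + 1) := funext fun d => funext fun w => pvStepA_eq d w
  rw [h, PySem.Dict.counter_eq_foldl]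

theorem pvMemCondFold {α : Type} (K : List α) (P : α → Prop) [DecidablePred P] (f : α → String) (x : String) :
    x ∈ K.foldl (fun s k => if P k then PySem.Set.add s (f k) else s) PySem.Set.empty
      ↔ ∃ k ∈ K, P k ∧ f k = x := by
  induction K using List.reverseRecOn with
  | nil => simp [PySem.Set.empty]
  | append_singleton K k ih =>
    rw [List.foldl_append]
    by_cases hp : P k
    · simp only [List.foldl_cons, List.foldl_nil, if_pos hp, PySem.Set.mem_add, ih]
      constructor
      · rintro (⟨u, hu, hpu, hfu⟩ | rfl)
        · exact ⟨u, by simp [hu], hpu, hfu⟩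
        · exact ⟨k, by simp, hp, rfl⟩
      · rintro ⟨u, hu, hpu, hfu⟩
        rcases List.mem_append.mp hu with hu | hu
        · exact Or.inl ⟨u, hu, hpu, hfu⟩
        · simp at hu; subst hu; subst hfu; exact Or.inr rfl
    · simp only [List.foldl_cons, List.foldl_nil, if_neg hp, ih]
      constructor
      · rintro ⟨u, hu, hpu, hfu⟩; exact ⟨u, by simp [hu], hpu, hfu⟩
      · rintro ⟨u, hu, hpu, hfu⟩
        rcases List.mem_append.mp hu with hu | hu
        · exact ⟨u, hu, hpu, hfu⟩
        · simp at hu; subst hu; exact absurd hpu hp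

theorem pvFoldDiff (K : List String) (T : PySem.Set String) (f : String → String) :
    K.foldl (fun s k => if PySem.Set.contains T (f k) = false then PySem.Set.add s (f k) else s) PySem.Set.empty
      = PySem.Set.diff (PySem.Set.ofList (K.map f)) T := by
  induction K using List.reverseRecOn with
  | nil => simp [PySem.Set.empty, PySem.Set.diff, PySem.Set.ofList]
  | append_singleton K k ih =>
    rw [List.foldl_append, List.map_append]
    simp only [List.foldl_cons, List.foldl_nil, List.map_cons, List.map_nil]
    rw [PySem.Set.ofList_append_singleton, ih]
    by_cases hT : PySem.Set.contains T (f k) = false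
    · rw [if_pos hT]
      by_cases hm : f k ∈ PySem.Set.ofList (K.map f)
      · rw [PySem.Set.add_of_mem hm]
        have : f k ∈ PySem.Set.diff (PySem.Set.ofList (K.map f)) T := by
          rw [PySem.Set.mem_diff]
          exact ⟨hm, by simpa [PySem.Set.contains_iff] using hT⟩
        rw [PySem.Set.add_of_mem this]
      · rw [PySem.Set.add_of_not_mem hm]
        have : f k ∉ PySem.Set.diff (PySem.Set.ofList (K.map f)) T := by
          rw [PySem.Set.mem_diff]; tauto
        rw [PySem.Set.add_of_not_mem this]
        have hT' : f k ∉ T := by simpa using hT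
        simp [PySem.Set.diff, List.filter_append, hT']
    · rw [if_neg hT]
      simp only [Bool.not_eq_false] at hT
      by_cases hm : f k ∈ PySem.Set.ofList (K.map f)
      · rw [PySem.Set.add_of_mem hm]
      · rw [PySem.Set.add_of_not_mem hm]
        have hT' : f k ∈ T := by simpa using hT
        simp [PySem.Set.diff, List.filter_append, hT']

-- ofList ∘ map f is unchanged by first deduplicating the source list
theorem pvOfListMapDedup (K : List String) (f : String → String) :
    PySem.Set.ofList ((PySem.Set.ofList K).map f) = PySem.Set.ofList (K.map f) := by
  induction K using List.reverseRecOn with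
  | nil => rfl
  | append_singleton K k ih =>
    rw [PySem.Set.ofList_append_singleton, List.map_append]
    simp only [List.map_cons, List.map_nil]
    rw [PySem.Set.ofList_append_singleton]
    by_cases hm : k ∈ PySem.Set.ofList K
    · rw [PySem.Set.add_of_mem hm, ih]
      have hk : k ∈ K := (PySem.Set.mem_ofList _ _).mp hm
      have hf : f k ∈ PySem.Set.ofList (K.map f) :=
        (PySem.Set.mem_ofList _ _).mpr (List.mem_map.mpr ⟨k, hk, rfl⟩)
      rw [PySem.Set.add_of_mem hf]
    · rw [PySem.Set.add_of_not_mem hm, List.map_append]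
      simp only [List.map_cons, List.map_nil]
      rw [PySem.Set.ofList_append_singleton, ih]

-- membership in B's dup-fold over the zipped pairs
theorem pvZipFold (ps : List (String × String)) (x : String) :
    x ∈ ps.foldl (fun s p => if p.1 == p.2 then PySem.Set.add s (PySem.Str.lower p.1) else s) PySem.Set.empty
      ↔ ∃ p ∈ ps, p.1 = p.2 ∧ PySem.Str.lower p.1 = x := by
  have h : (fun (s : PySem.Set String) (p : String × String) =>
      if p.1 == p.2 then PySem.Set.add s (PySem.Str.lower p.1) else s)
      = fun s p => if p.1 = p.2 then PySem.Set.add s (PySem.Str.lower p.1) else s := by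
    funext s p; by_cases h : p.1 = p.2 <;> simp [h]
  rw [h, pvMemCondFold ps (fun p => p.1 = p.2) (fun p => PySem.Str.lower p.1) x]

theorem pvCountCons (a b : String) (t : List String) :
    (b :: t).count a = t.count a + (if b = a then 1 else 0) := by
  by_cases h : b = a <;> simp [h]

-- in a ≤-sorted list, an element occurs at least twice iff it forms an adjacent equal pair
theorem pvAdjCount (l : List String) (hs : l.Pairwise (· ≤ ·)) (a : String) :
    (a, a) ∈ l.zip (l.drop 1) ↔ 2 ≤ l.count a := by
  induction l with
  | nil => simp
  | cons b t ih =>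
    rcases List.pairwise_cons.mp hs with ⟨hb, ht⟩
    cases t with
    | nil =>
      constructor
      · intro h; simp at h
      · intro h
        rw [pvCountCons] at h
        by_cases hba : b = a <;> simp [hba] at h
    | cons c t' =>
      rcases List.pairwise_cons.mp ht with ⟨hc, _⟩
      have hzip : (b :: c :: t').zip ((b :: c :: t').drop 1)
          = (b, c) :: (c :: t').zip ((c :: t').drop 1) := by simp
      rw [hzip]
      constructor
      · intro hmem
        rcases List.mem_cons.mp hmem with heq | hmem'
        · rw [Prod.mk.injEq] at heq
          obtain ⟨h1, h2⟩ := heq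
          subst h1; subst h2
          rw [pvCountCons, pvCountCons]
          simp
        · have h2 := (ih ht).mp hmem'
          rw [pvCountCons]
          omega
      · intro hcnt
        by_cases hba : b = a
        · subst hba
          have hmemt : b ∈ c :: t' := by
            rw [pvCountCons, if_pos rfl] at hcnt
            exact List.count_pos_iff.mp (by omega)
          have hcb : c = b := by
            rcases List.mem_cons.mp hmemt with h | h
            · exact h.symm
            · have h1 : b ≤ c := hb c (by simp)
              have h2 : c ≤ b := hc b h
              exact le_antisymm h2 h1
          subst hcb
          simp
        · have hcnt' : 2 ≤ (c :: t').count a := by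
            rw [pvCountCons] at hcnt
            simp [hba] at hcnt
            omega
          exact List.mem_cons_of_mem _ ((ih ht).mpr hcnt')

theorem pvContainsCongr (s t : PySem.Set String) (h : ∀ y, y ∈ s ↔ y ∈ t) (x : String) :
    PySem.Set.contains s x = PySem.Set.contains t x := by
  by_cases hm : x ∈ s
  · have ht := (h x).mp hm
    simp [hm, ht]
  · have ht : x ∉ t := fun m => hm ((h x).mpr m)
    simp [hm, ht]

theorem pvDiffCongr (s t t' : PySem.Set String) (h : ∀ y, y ∈ t ↔ y ∈ t') :
    PySem.Set.diff s t = PySem.Set.diff s t' := by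
  unfold PySem.Set.diff
  apply List.filter_congr
  intro x _
  rw [pvContainsCongr t t' h x]

-- ===== VERDICT (by name: the statement is the Claim_ definition above) =====
theorem find_in_different_registers_spec : Claim_equal_find_in_different_registers := by
  intro words _
  unfold Spec_find_in_different_registers find_in_different_registers find_in_different_registers_alt
  have hslice : PySem.List.slice (PySem.List.sorted words (fun x => x) false) (some 1) none
      = (PySem.List.sorted words (fun x => x) false).drop 1 := by
    simpa using PySem.List.slice_from_natCast
      (xs := PySem.List.sorted words (fun x => x) false) (a := 1)
  have hperm : (PySem.List.sorted words (fun x => x) false).Perm words :=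
    PySem.List.sorted_perm words (fun x => x) false
  have hpw : (PySem.List.sorted words (fun x => x) false).Pairwise (· ≤ ·) := by
    simpa using PySem.List.sorted_pairwise (xs := words) (key := fun x => x)
  simp only [pvTempA_eq, PySem.Dict.keys_counter, hslice]
  rw [pvFoldDiff, pvOfListMapDedup]
  apply pvDiffCongr
  intro y
  rw [pvZipFold, pvMemCondFold]
  constructor
  · rintro ⟨k, hk, hgt, hf⟩
    rw [PySem.Dict.getD_counter] at hgt
    have hcnt : 2 ≤ (PySem.List.sorted words (fun x => x) false).count k := by
      rw [hperm.count_eq]; omega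
    exact ⟨(k, k), (pvAdjCount _ hpw k).mpr hcnt, rfl, hf⟩
  · rintro ⟨⟨a, b⟩, hp, heq, hf⟩
    simp only at heq hf
    subst heq
    have hcnt : 2 ≤ (PySem.List.sorted words (fun x => x) false).count a :=
      (pvAdjCount _ hpw a).mp hp
    rw [hperm.count_eq] at hcnt
    refine ⟨a, ?_, ?_, hf⟩
    · exact (PySem.Set.mem_ofList _ _).mpr (List.count_pos_iff.mp (by omega))
    · rw [PySem.Dict.getD_counter]; omega
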